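-- pv_equiv track=rewrite | github.com/dimistsaousis/coursera | Algorithms & Data Structures Specialisation/Algorithms on Strings/Week2-Burrow-Wheeler Transform & Suffix Trees/3_bwmatching.py | preprocessed_bwt
-- ===== SOURCE A (Python) =====
-- from collections import defaultdict
--
-- def count_sort(string, alphabet):
--     alphabet_to_idx = {a: i for i, a in enumerate(alphabet)}
--     char_sorted_count = [0]*len(alphabet)
--     char_count_before_i = defaultdict(lambda: [0]*(len(string)+1))
--     for i, el in enumerate(string):
--         idx = alphabet_to_idx[el]
--         char_sorted_count[idx] += 1
--         char_count_before_i[el][i+1] = char_sorted_count[idx]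
--         for k in char_count_before_i.keys():
--             if k != el:
--                 char_count_before_i[k][i+1] = char_count_before_i[k][i]
--     return char_sorted_count, char_count_before_i
--
-- def preprocessed_bwt(b):
--     alphabet = '$ACGT'
--     char_sorted_count, char_count_before = count_sort(b, alphabet)
--     first_occurrence = dict()
--     c_total = 0
--     for i, c in enumerate(char_sorted_count):
--         if c > 0:
--             char = alphabet[i]
--             first_occurrence[char] = c_total
--             c_total += c
--     return first_occurrence, char_count_before
-- ===== SOURCE B (Python) =====
-- from collections import defaultdict
--
-- def preprocessed_bwt(b):
--     n = len(b)
--     # counts over the fixed BWT alphabet (KeyError on foreign characters, as in A)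
--     counts = {c: 0 for c in '$ACGT'}
--     for ch in b:
--         counts[ch] += 1
--     # one independent counting pass per distinct character of b, in first-occurrence order
--     char_count_before = defaultdict(lambda: [0] * (n + 1))
--     for c in dict.fromkeys(b):
--         arr = [0] * (n + 1)
--         running = 0
--         for j, ch in enumerate(b):
--             if ch == c:
--                 running += 1
--             arr[j + 1] = running
--         char_count_before[c] = arr
--     first_occurrence = {}
--     total = 0
--     for c in '$ACGT':
--         cnt = counts[c]
--         if cnt > 0:
--             first_occurrence[c] = total
--             total += cnt
--     return first_occurrence, char_count_before
-- ===== Notes on version B (the rewrite author's own statement) =====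
-- stated objective: alternative
-- what changed: A updates every already-seen character's prefix-count array inside the position loop (position-outer, keys-inner); B builds the counts once and fills each distinct character's prefix-count array in its own independent single pass, and derives first_occurrence from the counts dict over the fixed alphabet.
import Mathlib
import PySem

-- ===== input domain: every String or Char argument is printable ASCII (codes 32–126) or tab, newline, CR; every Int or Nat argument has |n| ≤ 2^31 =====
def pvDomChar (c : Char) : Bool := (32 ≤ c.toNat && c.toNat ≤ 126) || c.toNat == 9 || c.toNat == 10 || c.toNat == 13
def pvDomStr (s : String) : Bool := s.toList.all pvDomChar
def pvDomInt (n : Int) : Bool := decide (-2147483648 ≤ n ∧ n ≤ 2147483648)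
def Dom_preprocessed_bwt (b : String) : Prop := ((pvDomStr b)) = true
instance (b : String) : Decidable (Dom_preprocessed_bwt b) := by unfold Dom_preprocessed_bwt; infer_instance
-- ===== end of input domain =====

-- B replaces A's interleaved position-outer/keys-inner table update by one independent counting
-- pass per distinct character (objective: alternative decomposition; dict keys are modelled as Char
-- and rendered as one-char Strings at the return, exactly the one-char str keys of the Python).

-- ===== PORT A =====
def pvAlphabetA : List Char := ['$', 'A', 'C', 'G', 'T']

-- alphabet_to_idx = {a: i for i, a in enumerate(alphabet)}
def pvAlphaIdx : PySem.Dict Char Int :=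
  (PySem.List.enumerate pvAlphabetA 0).foldl (fun d p => d.insert p.2 p.1) PySem.Dict.empty

-- inner loop: for k in char_count_before_i.keys(): if k != el: d[k][i+1] = d[k][i]
-- (List.getD/List.set are exact here: every stored array has length len(string)+1 and i+1 ≤ len(string))
def pvCopyOthers (el : Char) (i : Nat) (dflt : List Int)
    (ks : List Char) (d : PySem.Dict Char (List Int)) : PySem.Dict Char (List Int) :=
  ks.foldl (fun dd k =>
    if k = el then dd
    else dd.insert k (((dd.getD k dflt)).set (i+1) ((dd.getD k dflt).getD i 0))) d

-- the 'for i, el in enumerate(string)' loop of count_sort, position i carried explicitly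
def pvCountLoop (dflt : List Int) : List Char → Nat → List Int × PySem.Dict Char (List Int) →
    List Int × PySem.Dict Char (List Int)
  | [], _, st => st
  | el :: rest, i, (csc, d) =>
    let idx := (pvAlphaIdx.getD el 0).toNat      -- KeyError for el outside the alphabet: excluded by Pre_
    let csc' := csc.set idx (csc.getD idx 0 + 1)
    let cnt := csc'.getD idx 0
    let arr := d.getD el dflt                     -- defaultdict access: default [0]*(len(string)+1)
    let d1 := d.insert el (arr.set (i+1) cnt)
    let d2 := pvCopyOthers el i dflt d1.keys d1
    pvCountLoop dflt rest (i+1) (csc', d2)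

def pvCountSort (s : List Char) : List Int × PySem.Dict Char (List Int) :=
  pvCountLoop (List.replicate (s.length + 1) 0) s 0 (List.replicate 5 0, PySem.Dict.empty)

def preprocessed_bwt (b : String) : (List (String × Int)) × (List (String × List Int)) :=
  let r := pvCountSort b.toList
  let fo := (PySem.List.enumerate r.1 0).foldl
      (fun (fd : PySem.Dict Char Int × Int) p =>
        if p.2 > 0 then (fd.1.insert (PySem.List.pyGetD pvAlphabetA p.1 '$') fd.2, fd.2 + p.2) else fd)
      (PySem.Dict.empty, 0)
  (fo.1.items.map (fun p => (String.singleton p.1, p.2)),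
   r.2.items.map (fun p => (String.singleton p.1, p.2)))

-- ===== PORT B =====
-- counts = {c: 0 for c in '$ACGT'}
def pvInitCounts : PySem.Dict Char Int :=
  (['$', 'A', 'C', 'G', 'T'] : List Char).foldl (fun d c => d.insert c 0) PySem.Dict.empty

-- counts[ch] += 1  (KeyError for ch outside the alphabet: excluded by Pre_; getD is exact inside it)
def pvCounts (s : List Char) : PySem.Dict Char Int :=
  s.foldl (fun d ch => d.insert ch (d.getD ch 0 + 1)) pvInitCounts

-- one pass over b for character c: arr[j+1] = running count of c in b[:j+1]
def pvPrefixArr (s : List Char) (c : Char) : List Int :=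
  (s.foldl (fun (st : List Int × Int) ch =>
      let r := if ch = c then st.2 + 1 else st.2
      (st.1 ++ [r], r)) ([0], 0)).1

def preprocessed_bwt_alt (b : String) : (List (String × Int)) × (List (String × List Int)) :=
  let s := b.toList
  let counts := pvCounts s
  let d := (PySem.List.dedup s).foldl (fun dd c => dd.insert c (pvPrefixArr s c)) PySem.Dict.empty
  let fo := (['$', 'A', 'C', 'G', 'T'] : List Char).foldl
      (fun (fd : PySem.Dict Char Int × Int) c =>
        let cnt := counts.getD c 0
        if cnt > 0 then (fd.1.insert c fd.2, fd.2 + cnt) else fd)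
      (PySem.Dict.empty, 0)
  (fo.1.items.map (fun p => (String.singleton p.1, p.2)),
   d.items.map (fun p => (String.singleton p.1, p.2)))

-- ===== PRECONDITION & SPEC =====
-- A raises KeyError on any character of b outside the five-letter BWT alphabet; Pre_ excludes exactly those.
def Pre_preprocessed_bwt (b : String) : Prop :=
  (b.toList.all (fun c => decide (c ∈ (['$', 'A', 'C', 'G', 'T'] : List Char)))) = true
instance (b : String) : Decidable (Pre_preprocessed_bwt b) := by unfold Pre_preprocessed_bwt; infer_instance

def pvWitness_preprocessed_bwt : String := "ACATGA$"

def Spec_preprocessed_bwt (b : String) (out : (List (String × Int)) × (List (String × List Int))) : Prop := out = preprocessed_bwt_alt b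
instance (b : String) (out : (List (String × Int)) × (List (String × List Int))) : Decidable (Spec_preprocessed_bwt b out) := by unfold Spec_preprocessed_bwt; infer_instance

-- ===== CLAIM (what is proved, stated in full; the proofs are below) =====
def Claim_equal_preprocessed_bwt : Prop := ∀ (b : String), Dom_preprocessed_bwt b → Pre_preprocessed_bwt b → Spec_preprocessed_bwt b (preprocessed_bwt b)

-- ===== LEMMAS AND PROOFS =====

-- the intended value of char_count_before[c] after the first i positions have been processed:
-- entry j is the count of c in s[:j] for j ≤ i, and still the default 0 beyond
def pvArrSpec (s : List Char) (c : Char) (i : Nat) : List Int :=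
  (List.range (s.length + 1)).map (fun j => if j ≤ i then ((s.take j).count c : Int) else 0)

-- char_sorted_count after processing q
def pvCntVec (q : List Char) : List Int :=
  [(q.count '$' : Int), (q.count 'A' : Int), (q.count 'C' : Int), (q.count 'G' : Int), (q.count 'T' : Int)]

lemma pv_arrSpec_replicate (s : List Char) (c : Char) (i : Nat) (h : c ∉ s.take i) :
    pvArrSpec s c i = List.replicate (s.length + 1) 0 := by
  unfold pvArrSpec
  rw [List.eq_replicate_iff]
  refine ⟨by simp, ?_⟩
  intro x hx
  simp only [List.mem_map, List.mem_range] at hx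
  obtain ⟨j, hj, rfl⟩ := hx
  split_ifs with hji
  · have hc : c ∉ s.take j := fun hc => h (List.take_subset_take_left s hji hc)
    simp [List.count_eq_zero.mpr hc]
  · rfl

lemma pv_arrSpec_zero (s : List Char) (c : Char) :
    pvArrSpec s c 0 = List.replicate (s.length + 1) 0 :=
  pv_arrSpec_replicate s c 0 (by simp)

lemma pv_arrSpec_getD (s : List Char) (c : Char) (i : Nat) (hi : i ≤ s.length) :
    (pvArrSpec s c i).getD i 0 = ((s.take i).count c : Int) := by
  have hlt : i < (List.range (s.length + 1)).length := by simp; omega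
  unfold pvArrSpec
  rw [List.getD_eq_getElem?_getD]
  simp [List.getElem?_map, List.getElem?_range (by omega : i < s.length + 1)]

lemma pv_arrSpec_set (s : List Char) (c : Char) (i : Nat) (v : Int)
    (hv : v = ((s.take (i+1)).count c : Int)) :
    (pvArrSpec s c i).set (i+1) v = pvArrSpec s c (i+1) := by
  apply List.ext_getElem
  · simp [pvArrSpec]
  · intro j hj1 hj2
    have hjlen : j < s.length + 1 := by simpa [pvArrSpec] using hj2
    rw [List.getElem_set]
    unfold pvArrSpec
    simp only [List.getElem_map, List.getElem_range]
    subst hv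
    by_cases h1 : i + 1 = j
    · subst h1; simp
    · simp only [if_neg h1]
      by_cases h2 : j ≤ i
      · rw [if_pos h2, if_pos (by omega : j ≤ i + 1)]
      · rw [if_neg h2, if_neg (by omega : ¬ j ≤ i + 1)]

lemma pv_cntVec_getD (el : Char) (h : el ∈ pvAlphabetA) (q : List Char) :
    (pvCntVec q).getD (pvAlphaIdx.getD el 0).toNat 0 = (q.count el : Int) := by
  simp only [pvAlphabetA, List.mem_cons, List.not_mem_nil, or_false] at h
  rcases h with rfl | rfl | rfl | rfl | rfl <;> rfl

lemma pv_cntVec_set (el : Char) (h : el ∈ pvAlphabetA) (q : List Char) :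
    (pvCntVec q).set (pvAlphaIdx.getD el 0).toNat ((q.count el : Int) + 1) = pvCntVec (q ++ [el]) := by
  simp only [pvAlphabetA, List.mem_cons, List.not_mem_nil, or_false] at h
  rcases h with rfl | rfl | rfl | rfl | rfl <;>
    simp [pvCntVec, List.count_append, List.count_nil, List.set,
          show (pvAlphaIdx.getD '$' 0).toNat = 0 from by decide,
          show (pvAlphaIdx.getD 'A' 0).toNat = 1 from by decide,
          show (pvAlphaIdx.getD 'C' 0).toNat = 2 from by decide,
          show (pvAlphaIdx.getD 'G' 0).toNat = 3 from by decide,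
          show (pvAlphaIdx.getD 'T' 0).toNat = 4 from by decide]

lemma pv_copy_keys (el : Char) (i : Nat) (dflt : List Int) (ks : List Char) :
    ∀ d : PySem.Dict Char (List Int), (∀ k ∈ ks, d.contains k = true) →
      (pvCopyOthers el i dflt ks d).keys = d.keys := by
  induction ks with
  | nil => intro d _; rfl
  | cons k ks ih =>
    intro d hc
    show (pvCopyOthers el i dflt ks _).keys = _
    simp only []
    by_cases hk : k = el
    · rw [if_pos hk]
      exact ih d (fun x hx => hc x (List.mem_cons_of_mem _ hx))
    · rw [if_neg hk]
      rw [ih _ (fun x hx => by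
        rw [PySem.Dict.contains_insert]
        simp [hc x (List.mem_cons_of_mem _ hx)])]
      exact PySem.Dict.keys_insert_of_contains _ _ (hc k (List.mem_cons_self))

lemma pv_copy_getD (el : Char) (i : Nat) (dflt : List Int) (ks : List Char) :
    ks.Nodup → ∀ (d : PySem.Dict Char (List Int)) (c : Char),
      (pvCopyOthers el i dflt ks d).getD c dflt =
        if c ∈ ks ∧ c ≠ el then ((d.getD c dflt).set (i+1) ((d.getD c dflt).getD i 0))
        else d.getD c dflt := by
  induction ks with
  | nil => intro _ d c; simp [pvCopyOthers]
  | cons k ks ih =>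
    intro hnd d c
    have hk_not : k ∉ ks := (List.nodup_cons.mp hnd).1
    have hnd' : ks.Nodup := (List.nodup_cons.mp hnd).2
    show (pvCopyOthers el i dflt ks _).getD c dflt = _
    simp only []
    by_cases hk : k = el
    · rw [if_pos hk, ih hnd']
      subst hk
      by_cases hc : c ∈ ks ∧ c ≠ k
      · rw [if_pos hc, if_pos ⟨List.mem_cons_of_mem _ hc.1, hc.2⟩]
      · rw [if_neg hc]
        rw [if_neg (by
          rintro ⟨hm, hne⟩
          rcases List.mem_cons.mp hm with rfl | hm'
          · exact hne rfl
          · exact hc ⟨hm', hne⟩)]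
    · rw [if_neg hk, ih hnd']
      by_cases hck : c = k
      · subst hck
        rw [if_neg (fun h => hk_not h.1)]
        rw [if_pos ⟨List.mem_cons_self, hk⟩]
        rw [PySem.Dict.getD_insert]
        simp
      · by_cases hc : c ∈ ks ∧ c ≠ el
        · rw [if_pos hc, if_pos ⟨List.mem_cons_of_mem _ hc.1, hc.2⟩]
          rw [PySem.Dict.getD_insert, if_neg hck]
        · rw [if_neg hc]
          rw [PySem.Dict.getD_insert, if_neg hck]
          rw [if_neg (by
            rintro ⟨hm, hne⟩
            rcases List.mem_cons.mp hm with rfl | hm'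
            · exact hck rfl
            · exact hc ⟨hm', hne⟩)]

lemma pv_countLoop_inv (s : List Char) (halpha : ∀ c ∈ s, c ∈ pvAlphabetA) :
    ∀ (rest pre : List Char), s = pre ++ rest →
    ∀ d : PySem.Dict Char (List Int), d.keys = PySem.Set.ofList pre →
      (∀ c, d.getD c (List.replicate (s.length + 1) 0) = pvArrSpec s c pre.length) →
      (pvCountLoop (List.replicate (s.length + 1) 0) rest pre.length (pvCntVec pre, d)).1 = pvCntVec s ∧
      (pvCountLoop (List.replicate (s.length + 1) 0) rest pre.length (pvCntVec pre, d)).2.keys = PySem.Set.ofList s ∧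
      (∀ c, (pvCountLoop (List.replicate (s.length + 1) 0) rest pre.length (pvCntVec pre, d)).2.getD c
        (List.replicate (s.length + 1) 0) = pvArrSpec s c s.length) := by
  intro rest
  induction rest with
  | nil =>
    intro pre h d hkeys hgetD
    rw [List.append_nil] at h
    subst h
    exact ⟨rfl, hkeys, hgetD⟩
  | cons el rest' ih =>
    intro pre h d hkeys hgetD
    set dflt := List.replicate (s.length + 1) (0 : Int) with hdflt
    have hel : el ∈ pvAlphabetA := halpha el (h ▸ (by simp))
    have hi : pre.length < s.length := by subst h; simp
    have htake1 : s.take (pre.length + 1) = pre ++ [el] := by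
      subst h
      rw [show pre.length + 1 = pre.length + 1 from rfl]
      rw [List.take_append]
      simp
    have htake0 : s.take pre.length = pre := by
      subst h; exact List.take_left' rfl
    -- one unfolding step of the loop
    have e1 : (pvCntVec pre).set (pvAlphaIdx.getD el 0).toNat
        ((pvCntVec pre).getD (pvAlphaIdx.getD el 0).toNat 0 + 1) = pvCntVec (pre ++ [el]) := by
      rw [pv_cntVec_getD el hel, pv_cntVec_set el hel]
    have e2 : (pvCntVec (pre ++ [el])).getD (pvAlphaIdx.getD el 0).toNat 0
        = (((pre ++ [el]).count el : Nat) : Int) := pv_cntVec_getD el hel _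
    have e3 : d.getD el dflt = pvArrSpec s el pre.length := hgetD el
    have e4 : (pvArrSpec s el pre.length).set (pre.length + 1) (((pre ++ [el]).count el : Nat) : Int)
        = pvArrSpec s el (pre.length + 1) := by
      apply pv_arrSpec_set s el pre.length _
      rw [htake1]
    have step : pvCountLoop dflt (el :: rest') pre.length (pvCntVec pre, d)
        = pvCountLoop dflt rest' (pre.length + 1)
            (pvCntVec (pre ++ [el]),
             pvCopyOthers el pre.length dflt
               (d.insert el (pvArrSpec s el (pre.length + 1))).keys
               (d.insert el (pvArrSpec s el (pre.length + 1)))) := by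
      show pvCountLoop dflt rest' (pre.length + 1) _ = _
      rw [e1, e2, e3, e4]
    rw [step]
    set d1 := d.insert el (pvArrSpec s el (pre.length + 1)) with hd1
    set d2 := pvCopyOthers el pre.length dflt d1.keys d1 with hd2
    -- keys of d1
    have hkeys1 : d1.keys = PySem.Set.ofList (pre ++ [el]) := by
      rw [PySem.Set.ofList_append_singleton, PySem.Set.add_eq_ite]
      by_cases hmem : el ∈ PySem.Set.ofList pre
      · rw [if_pos hmem, hd1, PySem.Dict.keys_insert_of_contains _ _
          (by rw [PySem.Dict.contains_eq_decide_mem_keys, hkeys]; simpa using hmem), hkeys]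
      · rw [if_neg hmem, hd1, PySem.Dict.keys_insert_of_not_contains _ _
          (by rw [PySem.Dict.contains_eq_decide_mem_keys, hkeys]; simpa using hmem), hkeys]
    have hgetD1 : ∀ c, d1.getD c dflt = if c = el then pvArrSpec s el (pre.length + 1)
        else pvArrSpec s c pre.length := by
      intro c
      rw [hd1, PySem.Dict.getD_insert]
      split_ifs with hc
      · rfl
      · exact hgetD c
    have hnd1 : d1.keys.Nodup := by rw [hkeys1]; exact PySem.Set.nodup_ofList _
    -- keys and getD of d2
    have hkeys2 : d2.keys = PySem.Set.ofList (pre ++ [el]) := by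
      rw [hd2, pv_copy_keys el pre.length dflt d1.keys d1
        (fun k hk => by rw [PySem.Dict.contains_eq_decide_mem_keys]; simpa using hk), hkeys1]
    have hgetD2 : ∀ c, d2.getD c dflt = pvArrSpec s c (pre.length + 1) := by
      intro c
      rw [hd2, pv_copy_getD el pre.length dflt d1.keys hnd1 d1 c]
      by_cases hcel : c = el
      · rw [if_neg (fun hh => hh.2 hcel), hgetD1, if_pos hcel, hcel]
      · by_cases hck : c ∈ d1.keys
        · rw [if_pos ⟨hck, hcel⟩, hgetD1, if_neg hcel]
          have hcpre : c ∈ pre := by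
            rw [hkeys1] at hck
            rcases (by simpa using (PySem.Set.mem_ofList _ _).mp hck : c ∈ pre ∨ c = el) with h' | h'
            · exact h'
            · exact absurd h' hcel
          rw [pv_arrSpec_getD s c pre.length (le_of_lt hi)]
          apply pv_arrSpec_set s c pre.length _
          rw [htake1, htake0, List.count_append]
          simp [Ne.symm hcel]
        · rw [if_neg (fun hh => hck hh.1), hgetD1, if_neg hcel]
          have hcnot : c ∉ pre ++ [el] := by
            intro hmem
            apply hck
            rw [hkeys1]
            exact (PySem.Set.mem_ofList _ _).mpr hmem
          rw [pv_arrSpec_replicate s c pre.length (by rw [htake0]; simp at hcnot; exact fun hc => hcnot.1 hc),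
              pv_arrSpec_replicate s c (pre.length + 1) (by rw [htake1]; exact hcnot)]
    -- apply the induction hypothesis at pre ++ [el]
    have hlen : (pre ++ [el]).length = pre.length + 1 := by simp
    have := ih (pre ++ [el]) (by rw [h]; simp) d2 (by rw [hkeys2]) (by rw [hlen]; exact hgetD2)
    rw [hlen] at this
    exact this

lemma pv_countSort_spec (s : List Char) (halpha : ∀ c ∈ s, c ∈ pvAlphabetA) :
    (pvCountSort s).1 = pvCntVec s ∧
    (pvCountSort s).2.items = (PySem.Set.ofList s).map (fun c => (c, pvArrSpec s c s.length)) := by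
  have h0 : pvCntVec ([] : List Char) = List.replicate 5 0 := by simp [pvCntVec]
  have h := pv_countLoop_inv s halpha s [] rfl PySem.Dict.empty rfl
    (fun c => by
      rw [PySem.Dict.getD_empty]
      exact (pv_arrSpec_zero s c).symm)
  rw [show ([] : List Char).length = 0 from rfl, h0] at h
  obtain ⟨h1, h2, h3⟩ := h
  refine ⟨h1, ?_⟩
  have hnd : (pvCountSort s).2.keys.Nodup := by
    show (pvCountLoop _ s 0 (List.replicate 5 0, PySem.Dict.empty)).2.keys.Nodup
    rw [h2]; exact PySem.Set.nodup_ofList _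
  rw [PySem.Dict.items_eq_map_keys _ hnd (List.replicate (s.length + 1) 0)]
  show List.map _ (pvCountLoop _ s 0 (List.replicate 5 0, PySem.Dict.empty)).2.keys = _
  rw [h2]
  apply List.map_congr_left
  intro c _
  show (c, _) = (c, _)
  rw [show (pvCountSort s).2 = (pvCountLoop (List.replicate (s.length + 1) 0) s 0
    (List.replicate 5 0, PySem.Dict.empty)).2 from rfl, h3 c]

lemma pv_prefixFold (c : Char) :
    ∀ (s : List Char) (acc : List Int) (r : Int),
      (s.foldl (fun (st : List Int × Int) ch =>
        let r' := if ch = c then st.2 + 1 else st.2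
        (st.1 ++ [r'], r')) (acc, r)).1
      = acc ++ (List.range s.length).map (fun j => r + ((s.take (j+1)).count c : Int)) := by
  intro s
  induction s with
  | nil => intro acc r; simp
  | cons ch t ih =>
    intro acc r
    show (t.foldl _ (acc ++ [if ch = c then r + 1 else r], if ch = c then r + 1 else r)).1 = _
    rw [ih]
    simp only [List.length_cons, List.range_succ_eq_map, List.map_cons, List.map_map]
    rw [List.append_assoc]
    congr 1
    rw [List.singleton_append]
    by_cases hch : ch = c
    · subst hch
      congr 1
      · simp
      · apply List.map_congr_left
        intro j _
        simp [List.take_succ_cons]; ring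
    · congr 1
      · simp [hch]
      · apply List.map_congr_left
        intro j _
        simp [List.take_succ_cons, hch]

lemma pv_prefixArr_eq (s : List Char) (c : Char) :
    pvPrefixArr s c = pvArrSpec s c s.length := by
  unfold pvPrefixArr
  rw [show (([0], 0) : List Int × Int) = ([(0:Int)], (0:Int)) from rfl]
  rw [pv_prefixFold c s [0] 0]
  unfold pvArrSpec
  rw [List.range_succ_eq_map, List.map_cons, List.map_map]
  rw [show ((if (0:Nat) ≤ s.length then ((s.take 0).count c : Int) else 0)) = (0:Int) by simp]
  rw [List.singleton_append]
  congr 1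
  apply List.map_congr_left
  intro j hj
  simp only [List.mem_range] at hj
  simp [Nat.succ_le_of_lt hj]

lemma pv_initCounts_getD (c : Char) : pvInitCounts.getD c 0 = 0 := by
  have h : pvInitCounts = PySem.Dict.mk [('$', 0), ('A', 0), ('C', 0), ('G', 0), ('T', 0)] := by rfl
  rw [h, PySem.Dict.getD_eq_get?_getD]
  simp only [PySem.Dict.get?_mk_cons]
  split_ifs <;> rfl

lemma pv_counts_getD (s : List Char) (c : Char) : (pvCounts s).getD c 0 = (s.count c : Int) := by
  unfold pvCounts
  rw [PySem.Dict.getD_foldl_insert_add_one, pv_initCounts_getD, zero_add]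

lemma pv_final (b : String) (hpre : ∀ c ∈ b.toList, c ∈ (['$', 'A', 'C', 'G', 'T'] : List Char)) :
    preprocessed_bwt b = preprocessed_bwt_alt b := by
  have halpha : ∀ c ∈ b.toList, c ∈ pvAlphabetA := hpre
  obtain ⟨h1, h2⟩ := pv_countSort_spec b.toList halpha
  show (_, _) = (_, _)
  rw [Prod.mk.injEq]
  constructor
  · -- first_occurrence
    rw [h1]
    congr 1
    simp only [pvCntVec, PySem.List.enumerate_cons, PySem.List.enumerate_nil,
      List.foldl_cons, List.foldl_nil, pv_counts_getD]
    norm_num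
    rw [show PySem.List.pyGetD pvAlphabetA 0 '$' = '$' from by decide,
        show PySem.List.pyGetD pvAlphabetA 1 '$' = 'A' from by decide,
        show PySem.List.pyGetD pvAlphabetA 2 '$' = 'C' from by decide,
        show PySem.List.pyGetD pvAlphabetA 3 '$' = 'G' from by decide,
        show PySem.List.pyGetD pvAlphabetA 4 '$' = 'T' from by decide]
  · -- char_count_before
    rw [h2]
    simp only [PySem.List.dedup_eq_ofList]
    rw [PySem.Dict.items_foldl_insert_fresh (PySem.Set.ofList b.toList) (fun c => c)
      (fun c => pvPrefixArr b.toList c) PySem.Dict.empty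
      (fun a _ => PySem.Dict.contains_empty a)
      (by simp [PySem.Set.nodup_ofList b.toList])]
    rw [show PySem.Dict.empty.items = ([] : List (Char × List Int)) from rfl, List.nil_append]
    congr 1
    apply List.map_congr_left
    intro c _
    rw [pv_prefixArr_eq]

-- ===== VERDICT (by name: the statement is the Claim_ definition above) =====
theorem preprocessed_bwt_spec : Claim_equal_preprocessed_bwt := by
  intro b _ hpre
  unfold Spec_preprocessed_bwt
  rw [Pre_preprocessed_bwt, List.all_eq_true] at hpre
  exact pv_final b (fun c hc => by simpa using hpre c hc)
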